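-- pv_equiv track=rewrite | github.com/iavicha/epam_spring_2021_vetchinin | homework1/task02.py | check_fibonacci
-- ===== SOURCE A (Python) =====
-- from typing import Sequence
--
-- def check_fibonacci(data: Sequence[int]) -> bool:
--     if len(data) == 0:
--         return False
--
--     elif data[0] not in (0, 1):
--         return False
--
--     elif len(data) > 1 and data[1] != 1:
--         return False
--
--     for index, numb in enumerate(data):
--         if index > 1:
--             if data[index - 2] + data[index - 1] != numb:
--                 return False
--
--     return True
-- ===== SOURCE B (Python) =====
-- from typing import Sequence
--
-- def check_fibonacci(data: Sequence[int]) -> bool: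
--     if len(data) == 0:
--         return False
--     if data[0] != 0 and data[0] != 1:
--         return False
--     expected = []
--     a, b = data[0], 1
--     for _ in range(len(data)):
--         expected.append(a)
--         a, b = b, a + b
--     return list(data) == expected
-- ===== Notes on version B (the rewrite author's own statement) =====
-- stated objective: alternative
-- what changed: B replaces A's enumerate-driven triple scan with separate second-element guard by building the expected Fibonacci sequence (seeded from the first element and the unit second term) in one forward pass and comparing it to the input element-wise.
import Mathlib
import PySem

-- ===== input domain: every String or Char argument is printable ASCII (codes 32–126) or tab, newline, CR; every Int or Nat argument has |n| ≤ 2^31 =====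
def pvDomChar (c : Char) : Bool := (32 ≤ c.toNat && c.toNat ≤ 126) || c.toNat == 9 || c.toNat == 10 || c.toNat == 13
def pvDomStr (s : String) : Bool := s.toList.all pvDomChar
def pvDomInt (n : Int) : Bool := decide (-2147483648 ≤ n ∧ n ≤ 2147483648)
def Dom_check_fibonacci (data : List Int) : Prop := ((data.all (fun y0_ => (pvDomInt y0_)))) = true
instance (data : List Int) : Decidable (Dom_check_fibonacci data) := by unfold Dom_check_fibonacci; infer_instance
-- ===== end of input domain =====

-- B builds the expected Fibonacci list seeded from the first element and compares it element-wise,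
-- instead of A's enumerate loop over index triples; same return value everywhere (alternative decomposition).

-- ===== PORT A =====
-- the 'for index, numb in enumerate(data)' loop with its early 'return False'
-- (indices index-2, index-1 are always in range when the branch fires, so pyGetD is exact here)
def checkLoopA (data : List Int) : List (Int × Int) → Bool
  | [] => true
  | (index, numb) :: rest =>
    if index > 1 then
      if PySem.List.pyGetD data (index - 2) 0 + PySem.List.pyGetD data (index - 1) 0 ≠ numb then
        false
      else checkLoopA data rest
    else checkLoopA data rest

def check_fibonacci (data : List Int) : Bool :=
  if data.length = 0 then false
  else if ¬ (PySem.List.pyGetD data 0 0 = 0 ∨ PySem.List.pyGetD data 0 0 = 1) then false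
  else if data.length > 1 ∧ PySem.List.pyGetD data 1 0 ≠ 1 then false
  else checkLoopA data (PySem.List.enumerate data 0)

-- ===== PORT B =====
-- Source B's loop building the expected list: append a, then shift (a, b) to (b, a + b)
def buildExp (a b : Int) : Nat → List Int
  | 0 => []
  | n + 1 => a :: buildExp b (a + b) n

def check_fibonacci_alt (data : List Int) : Bool :=
  if data.length = 0 then false
  else if PySem.List.pyGetD data 0 0 ≠ 0 ∧ PySem.List.pyGetD data 0 0 ≠ 1 then false
  else decide (data = buildExp (PySem.List.pyGetD data 0 0) 1 data.length)

-- ===== PRECONDITION & SPEC =====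
def Spec_check_fibonacci (data : List Int) (out : Bool) : Prop := out = check_fibonacci_alt data
instance (data : List Int) (out : Bool) : Decidable (Spec_check_fibonacci data out) := by unfold Spec_check_fibonacci; infer_instance

-- ===== CLAIM (what is proved, stated in full; the proofs are below) =====
def Claim_equal_check_fibonacci : Prop := ∀ (data : List Int), Dom_check_fibonacci data → Spec_check_fibonacci data (check_fibonacci data)

-- ===== LEMMAS AND PROOFS =====

theorem length_buildExp (a b : Int) (n : Nat) : (buildExp a b n).length = n := by
  induction n generalizing a b with
  | zero => rfl
  | succ m ih => simp [buildExp, ih]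

theorem checkLoopA_eq_all (data : List Int) (l : List (Int × Int)) :
    checkLoopA data l =
      l.all (fun p => decide (p.1 ≤ 1 ∨
        PySem.List.pyGetD data (p.1 - 2) 0 + PySem.List.pyGetD data (p.1 - 1) 0 = p.2)) := by
  induction l with
  | nil => rfl
  | cons p rest ih =>
    obtain ⟨i, n⟩ := p
    simp only [checkLoopA, List.all_cons, ih]
    by_cases h1 : i > 1
    · by_cases h2 : PySem.List.pyGetD data (i - 2) 0 + PySem.List.pyGetD data (i - 1) 0 = n
      · simp [h1, h2]
      · have hle : ¬ (i ≤ 1) := by omega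
        simp [h1, h2, hle]
    · have hle : i ≤ 1 := by omega
      simp [h1, hle]

theorem loopA_iff (data : List Int) :
    checkLoopA data (PySem.List.enumerate data 0) = true ↔
      ∀ (k : Nat) (h : k < data.length), 2 ≤ k →
        data[k - 2]'(by omega) + data[k - 1]'(by omega) = data[k] := by
  rw [checkLoopA_eq_all, List.all_eq_true]
  constructor
  · intro H k h hk
    have := H ((k : Int), data[k]) (by
      rw [PySem.List.mem_enumerate_iff]; exact ⟨k, h, by simp⟩)
    simp only [decide_eq_true_eq] at this
    rcases this with h1 | h2
    · omega
    · have e2 : ((k : Int) - 2) = ((k - 2 : Nat) : Int) := by omega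
      have e1 : ((k : Int) - 1) = ((k - 1 : Nat) : Int) := by omega
      rw [e2, e1, PySem.List.pyGetD_natCast, PySem.List.pyGetD_natCast] at h2
      rw [List.getD_eq_getElem _ _ (by omega), List.getD_eq_getElem _ _ (by omega)] at h2
      exact h2
  · intro H p hp
    rw [PySem.List.mem_enumerate_iff] at hp
    obtain ⟨k, h, rfl⟩ := hp
    simp only [zero_add, decide_eq_true_eq]
    by_cases hk : 2 ≤ k
    · right
      have e2 : ((k : Int) - 2) = ((k - 2 : Nat) : Int) := by omega
      have e1 : ((k : Int) - 1) = ((k - 1 : Nat) : Int) := by omega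
      rw [e2, e1, PySem.List.pyGetD_natCast, PySem.List.pyGetD_natCast,
        List.getD_eq_getElem _ _ (by omega), List.getD_eq_getElem _ _ (by omega)]
      exact H k h hk
    · left; omega

theorem getElem_buildExp_zero (a b : Int) (n : Nat) (h : 0 < (buildExp a b n).length) :
    (buildExp a b n)[0] = a := by
  cases n with
  | zero => simp [buildExp] at h
  | succ m => rfl

theorem getElem_buildExp_one (a b : Int) (n : Nat) (h : 1 < (buildExp a b n).length) :
    (buildExp a b n)[1] = b := by
  match n with
  | 0 => simp [buildExp] at h
  | 1 => simp [buildExp] at h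
  | m + 2 => rfl

theorem getElem_buildExp_rec (i : Nat) : ∀ (a b : Int) (n : Nat) (h : i + 2 < n),
    (buildExp a b n)[i + 2]'(by rw [length_buildExp]; omega) =
      (buildExp a b n)[i]'(by rw [length_buildExp]; omega) +
        (buildExp a b n)[i + 1]'(by rw [length_buildExp]; omega) := by
  induction i with
  | zero =>
    intro a b n h
    match n, h with
    | m + 3, _ => simp [buildExp]
  | succ j ih =>
    intro a b n h
    match n, h with
    | m + 1, _ =>
      have := ih b (a + b) m (by omega)
      show (buildExp b (a + b) m)[j + 2]'(by rw [length_buildExp]; omega) = _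
      rw [this]
      rfl

-- the heart: A's guard+scan is exactly "data equals the expected list seeded from data[0] and 1"
theorem scan_iff_buildExp (x : Int) (data : List Int) (h0 : 0 < data.length)
    (hx : data[0] = x) :
    ((∀ (hl : data.length > 1), data[1]'(by omega) = 1) ∧
      (∀ (k : Nat) (h : k < data.length), 2 ≤ k →
        data[k - 2]'(by omega) + data[k - 1]'(by omega) = data[k])) ↔
      data = buildExp x 1 data.length := by
  constructor
  · rintro ⟨h1, hrec⟩
    have main : ∀ i, ∀ (hi : i < data.length),
        data[i] = (buildExp x 1 data.length)[i]'(by rw [length_buildExp]; omega) := by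
      intro i
      induction i using Nat.strong_induction_on with
      | _ i ih =>
        intro hi
        match i with
        | 0 => rw [hx]; exact (getElem_buildExp_zero _ _ _ (by rw [length_buildExp]; omega)).symm
        | 1 => rw [h1 (by omega)]
               exact (getElem_buildExp_one _ _ _ (by rw [length_buildExp]; omega)).symm
        | j + 2 =>
          rw [getElem_buildExp_rec j x 1 data.length (by omega),
            ← ih j (by omega) (by omega), ← ih (j + 1) (by omega) (by omega)]
          exact (hrec (j + 2) hi (by omega)).symm
    exact List.ext_getElem (by rw [length_buildExp]) (fun i hi _ => main i hi)
  · intro heq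
    constructor
    · intro hl
      rw [List.getElem_of_eq heq (by omega)]
      exact getElem_buildExp_one _ _ _ (by rw [length_buildExp]; omega)
    · intro k hk h2
      have e : ∀ (m : Nat) (hm : m < data.length),
          data[m] = (buildExp x 1 data.length)[m]'(by rw [length_buildExp]; omega) :=
        fun m hm => List.getElem_of_eq heq hm
      rw [e _ hk, e _ (by omega), e _ (by omega)]
      have hr := getElem_buildExp_rec (k - 2) x 1 data.length (by omega)
      have h3 : (k - 2) + 2 = k := by omega
      have h4 : (k - 2) + 1 = k - 1 := by omega
      simp only [h3, h4] at hr
      exact hr.symm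

-- ===== VERDICT (by name: the statement is the Claim_ definition above) =====
theorem check_fibonacci_spec : Claim_equal_check_fibonacci := by
  intro data _
  unfold Spec_check_fibonacci check_fibonacci check_fibonacci_alt
  match data with
  | [] => rfl
  | x :: rest =>
    have h0 : 0 < (x :: rest).length := by simp
    have hget0 : PySem.List.pyGetD (x :: rest) 0 0 = x := by
      simp [PySem.List.pyGetD_zero_cons]
    rw [hget0, if_neg (by simp : ¬ ((x :: rest).length = 0)),
      if_neg (by simp : ¬ ((x :: rest).length = 0))]
    by_cases hx : x = 0 ∨ x = 1
    · have hx' : ¬ (x ≠ 0 ∧ x ≠ 1) := by tauto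
      rw [if_neg (by tauto), if_neg hx']
      have key := scan_iff_buildExp x (x :: rest) h0 rfl
      by_cases hg : (x :: rest).length > 1 ∧ PySem.List.pyGetD (x :: rest) 1 0 ≠ 1
      · rw [if_pos hg]
        obtain ⟨hlen, hne⟩ := hg
        have h1v : PySem.List.pyGetD (x :: rest) 1 0 = (x :: rest)[1]'(by omega) := by
          have e : ((1 : Int)) = ((1 : Nat) : Int) := by norm_num
          rw [e, PySem.List.pyGetD_natCast, List.getD_eq_getElem _ _ (by omega)]
        rw [h1v] at hne
        have hne' : ¬ ((x :: rest) = buildExp x 1 (x :: rest).length) := by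
          intro heq
          exact hne ((key.mpr heq).1 hlen)
        exact (decide_eq_false (by simpa using hne')).symm
      · rw [if_neg hg]
        push Not at hg
        have h1v : ∀ (hl : (x :: rest).length > 1), (x :: rest)[1]'(by omega) = 1 := by
          intro hl
          have := hg hl
          have e : ((1 : Int)) = ((1 : Nat) : Int) := by norm_num
          rw [e, PySem.List.pyGetD_natCast, List.getD_eq_getElem _ _ (by omega)] at this
          exact this
        by_cases hsc : ∀ (k : Nat) (h : k < (x :: rest).length), 2 ≤ k →
            (x :: rest)[k - 2]'(by omega) + (x :: rest)[k - 1]'(by omega) = (x :: rest)[k]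
        · have hA : checkLoopA (x :: rest) (PySem.List.enumerate (x :: rest) 0) = true :=
            (loopA_iff (x :: rest)).mpr hsc
          have heq := key.mp ⟨h1v, hsc⟩
          rw [hA]
          exact (decide_eq_true (by simpa using heq)).symm
        · have hA : checkLoopA (x :: rest) (PySem.List.enumerate (x :: rest) 0) = false :=
            Bool.eq_false_iff.mpr (fun h => hsc ((loopA_iff (x :: rest)).mp h))
          have hne' : ¬ ((x :: rest) = buildExp x 1 (x :: rest).length) := by
            intro heq
            exact hsc ((key.mpr heq).2)
          rw [hA]
          exact (decide_eq_false (by simpa using hne')).symm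
    · have hx' : x ≠ 0 ∧ x ≠ 1 := by tauto
      rw [if_pos (by tauto), if_pos hx']
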